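-- pv_equiv track=rewrite | github.com/MaryGeorgiou/adventofcode2020 | day10.py | find_diffs_in_chain_of_adapters
-- ===== SOURCE A (Python) =====
-- def find_diffs_in_chain_of_adapters(adapters):
--     diff_1 = 0
--     diff_2 = 0
--     diff_3 = 1  # there's always the diff of 3 jolts of the built-in adapter.
--     for i in range(len(adapters) - 1):
--         difference = adapters[i + 1] - adapters[i]
--         if difference == 1:
--             diff_1 += 1
--         elif difference == 2:
--             diff_2 += 1
--         elif difference == 3:
--             diff_3 += 1
--         else:
--             return None
--     return diff_1, diff_2, diff_3
-- ===== SOURCE B (Python) =====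
-- def find_diffs_in_chain_of_adapters(adapters):
--     diffs = [b - a for a, b in zip(adapters, adapters[1:])]
--     if any(d not in (1, 2, 3) for d in diffs):
--         return None
--     return diffs.count(1), diffs.count(2), diffs.count(3) + 1
-- ===== Notes on version B (the rewrite author's own statement) =====
-- stated objective: idiomatic
-- what changed: Replaces the single incremental branch-ladder loop with three counters by a compute-then-reduce structure: build the list of pairwise differences with zip, reject if any difference is outside {1,2,3}, then tally with list.count.
import Mathlib
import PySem

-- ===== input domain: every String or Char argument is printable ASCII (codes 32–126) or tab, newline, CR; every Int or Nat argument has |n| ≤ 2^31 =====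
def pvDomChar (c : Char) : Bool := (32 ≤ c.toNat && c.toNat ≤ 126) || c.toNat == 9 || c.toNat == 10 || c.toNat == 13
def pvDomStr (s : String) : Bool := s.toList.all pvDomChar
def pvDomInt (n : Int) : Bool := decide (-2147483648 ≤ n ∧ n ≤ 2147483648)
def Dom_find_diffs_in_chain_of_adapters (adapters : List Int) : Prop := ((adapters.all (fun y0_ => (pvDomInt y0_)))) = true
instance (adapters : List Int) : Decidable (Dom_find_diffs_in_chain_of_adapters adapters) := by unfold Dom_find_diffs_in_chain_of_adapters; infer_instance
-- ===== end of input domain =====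

-- B replaces A's incremental branch-ladder counting loop by compute-all-differences-then-reduce (idiomatic; return-value equivalence).

-- ===== PORT A =====
-- the loop over i in range(len(adapters)-1): adapters[i+1]-adapters[i] walks adjacent pairs,
-- carrying the three counters; early 'return None' on any other difference.
def pvGoA : List Int → Int → Int → Int → Option (Int × Int × Int)
  | a :: b :: rest, d1, d2, d3 =>
      let difference := b - a
      if difference = 1 then pvGoA (b :: rest) (d1 + 1) d2 d3
      else if difference = 2 then pvGoA (b :: rest) d1 (d2 + 1) d3
      else if difference = 3 then pvGoA (b :: rest) d1 d2 (d3 + 1)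
      else none
  | _, d1, d2, d3 => some (d1, d2, d3)

def find_diffs_in_chain_of_adapters (adapters : List Int) : Option (Int × Int × Int) :=
  pvGoA adapters 0 0 1

-- ===== PORT B =====
def find_diffs_in_chain_of_adapters_alt (adapters : List Int) : Option (Int × Int × Int) :=
  let diffs := List.zipWith (fun a b => b - a) adapters adapters.tail
  if diffs.any (fun d => ¬ (d = 1 ∨ d = 2 ∨ d = 3)) then none
  else some ((PySem.List.count diffs 1 : Int), (PySem.List.count diffs 2 : Int), (PySem.List.count diffs 3 : Int) + 1)

-- ===== PRECONDITION & SPEC =====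
def Spec_find_diffs_in_chain_of_adapters (adapters : List Int) (out : Option (Int × Int × Int)) : Prop := out = find_diffs_in_chain_of_adapters_alt adapters
instance (adapters : List Int) (out : Option (Int × Int × Int)) : Decidable (Spec_find_diffs_in_chain_of_adapters adapters out) := by unfold Spec_find_diffs_in_chain_of_adapters; infer_instance

-- ===== CLAIM (what is proved, stated in full; the proofs are below) =====
def Claim_equal_find_diffs_in_chain_of_adapters : Prop := ∀ (adapters : List Int), Dom_find_diffs_in_chain_of_adapters adapters → Spec_find_diffs_in_chain_of_adapters adapters (find_diffs_in_chain_of_adapters adapters)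

-- ===== LEMMAS AND PROOFS =====

lemma pvGoA_eq (l : List Int) : ∀ (d1 d2 d3 : Int),
    pvGoA l d1 d2 d3 =
      (let diffs := List.zipWith (fun a b => b - a) l l.tail
       if diffs.any (fun d => ¬ (d = 1 ∨ d = 2 ∨ d = 3)) then none
       else some (d1 + (PySem.List.count diffs 1 : Int), d2 + (PySem.List.count diffs 2 : Int),
                  d3 + (PySem.List.count diffs 3 : Int))) := by
  induction l with
  | nil => intro d1 d2 d3; simp [pvGoA]
  | cons a t ih =>
    intro d1 d2 d3
    cases t with
    | nil => simp [pvGoA]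
    | cons b rest =>
      simp only [pvGoA, List.tail_cons, List.zipWith_cons_cons, List.any_cons]
      by_cases h1 : b - a = 1
      · simp only [h1, ih]
        simp [PySem.List.count]
        split
        · rfl
        · simp; ring_nf
      · by_cases h2 : b - a = 2
        · simp only [h2, ih]
          simp [PySem.List.count]
          split
          · rfl
          · simp; ring_nf
        · by_cases h3 : b - a = 3
          · simp only [h3, ih]
            simp [PySem.List.count]
            split
            · rfl
            · simp; ring_nf
          · simp [h1, h2, h3]

-- ===== VERDICT (by name: the statement is the Claim_ definition above) =====
theorem find_diffs_in_chain_of_adapters_spec : Claim_equal_find_diffs_in_chain_of_adapters := by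
  intro adapters _
  show _ = _
  simp only [find_diffs_in_chain_of_adapters, find_diffs_in_chain_of_adapters_alt, pvGoA_eq]
  split
  · rfl
  · simp; ring
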